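-- pv_equiv track=rewrite | github.com/srp98/Python-Stuff | Coding Fun/Number_Pick.py | pick_numbers
-- ===== SOURCE A (Python) =====
-- def pick_numbers(arr):
--     """
--     Function which picks the maximum length of the numbers given a array which satisfy the condition, any two numbers
--     picked their absolute difference is less than or equal to 1
--     :param arr: Array of numbers
--     :return: Max length of numbers picked
--     """
--
--     maximum = 0
--     for i in arr:
--         c = arr.count(i)
--         d = arr.count(i-1)
--         c = c + d
--         if c > maximum:
--             maximum = c
--     return maximum
-- ===== SOURCE B (Python) =====
-- def pick_numbers(arr):
--     best = 0
--     run = 0       # length of the current run of equal values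
--     prevrun = 0   # length of the preceding run if its value is current-1, else 0
--     cur = None
--     for x in sorted(arr):
--         if x == cur:
--             run += 1
--         elif cur is not None and x == cur + 1:
--             prevrun, run, cur = run, 1, x
--         else:
--             prevrun, run, cur = 0, 1, x
--         if run + prevrun > best:
--             best = run + prevrun
--     return best
-- ===== Notes on version B (the rewrite author's own statement) =====
-- stated objective: faster
-- what changed: Sort the array once and take a single run-length scan over the sorted list, keeping the current and previous run lengths and a running maximum, instead of rescanning the whole array with count() for every element.
import Mathlib
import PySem

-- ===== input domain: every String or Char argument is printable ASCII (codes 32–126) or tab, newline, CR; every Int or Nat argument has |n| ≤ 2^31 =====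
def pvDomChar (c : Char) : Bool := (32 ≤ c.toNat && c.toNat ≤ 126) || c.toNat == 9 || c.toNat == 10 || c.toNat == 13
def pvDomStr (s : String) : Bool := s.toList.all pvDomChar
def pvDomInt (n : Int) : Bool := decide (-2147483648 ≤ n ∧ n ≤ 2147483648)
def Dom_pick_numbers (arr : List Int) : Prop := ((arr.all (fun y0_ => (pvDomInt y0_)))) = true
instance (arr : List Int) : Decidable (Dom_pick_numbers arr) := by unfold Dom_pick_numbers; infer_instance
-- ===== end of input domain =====

-- B sorts the array once and does a single run-length scan with a running maximum, instead of A's per-element rescans (objective: faster).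


-- ===== PORT A =====
def pick_numbers (arr : List Int) : Int :=
  arr.foldl (fun maximum i =>
    let c : Int := PySem.List.count arr i
    let d : Int := PySem.List.count arr (i - 1)
    let c := c + d
    if c > maximum then c else maximum) 0

-- ===== PORT B =====
-- loop body of Source B's single for-loop (state: best, run, prevrun, cur)
def pvStep (st : Int × Int × Int × Option Int) (x : Int) : Int × Int × Int × Option Int :=
  let best := st.1
  let run := st.2.1
  let prevrun := st.2.2.1
  let cur := st.2.2.2
  let s :=
    match cur with
    | some v =>
        if x = v then (run + 1, prevrun, cur)
        else if x = v + 1 then ((1 : Int), run, some x)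
        else ((1 : Int), (0 : Int), some x)
    | none => ((1 : Int), (0 : Int), some x)
  (if s.1 + s.2.1 > best then s.1 + s.2.1 else best, s.1, s.2.1, s.2.2)

def pick_numbers_alt (arr : List Int) : Int :=
  ((PySem.List.sorted arr (fun x => x) false).foldl pvStep (0, 0, 0, none)).1

-- ===== PRECONDITION & SPEC =====
def Spec_pick_numbers (arr : List Int) (out : Int) : Prop := out = pick_numbers_alt arr
instance (arr : List Int) (out : Int) : Decidable (Spec_pick_numbers arr out) := by unfold Spec_pick_numbers; infer_instance

-- ===== CLAIM (what is proved, stated in full; the proofs are below) =====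
def Claim_equal_pick_numbers : Prop := ∀ (arr : List Int), Dom_pick_numbers arr → Spec_pick_numbers arr (pick_numbers arr)

-- ===== LEMMAS AND PROOFS =====

-- the running maximum of f over a list
def pvBest (f : Int → Int) (a : Int) (l : List Int) : Int :=
  l.foldl (fun m i => if f i > m then f i else m) a

-- count(i) + count(i-1), as A computes it
def pvF (s : List Int) (v : Int) : Int := (s.count v : Int) + (s.count (v - 1) : Int)

theorem pvBest_init_le (f : Int → Int) (a : Int) (l : List Int) : a ≤ pvBest f a l := by
  induction l generalizing a with
  | nil => simp [pvBest]
  | cons x xs ih =>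
      simp only [pvBest, List.foldl_cons]
      refine le_trans ?_ (ih (if f x > a then f x else a))
      split <;> omega

theorem pvBest_mem_le (f : Int → Int) {i : Int} :
    ∀ (l : List Int) (a : Int), i ∈ l → f i ≤ pvBest f a l := by
  intro l
  induction l with
  | nil => intro a h; cases h
  | cons x xs ih =>
      intro a h
      simp only [pvBest, List.foldl_cons]
      rcases List.mem_cons.mp h with rfl | h'
      · refine le_trans ?_ (pvBest_init_le f _ xs)
        split <;> omega
      · exact ih _ h'

theorem pvBest_cases (f : Int → Int) (a : Int) (l : List Int) :
    pvBest f a l = a ∨ ∃ i ∈ l, pvBest f a l = f i := by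
  induction l generalizing a with
  | nil => exact Or.inl rfl
  | cons x xs ih =>
      simp only [pvBest, List.foldl_cons]
      rcases ih (if f x > a then f x else a) with h | ⟨i, hi, h⟩
      · by_cases hx : f x > a
        · exact Or.inr ⟨x, List.mem_cons_self .., by simpa [hx] using h⟩
        · exact Or.inl (by simpa [hx] using h)
      · exact Or.inr ⟨i, List.mem_cons_of_mem _ hi, h⟩

theorem pvBest_le (f : Int → Int) (l : List Int) (c : Int)
    (h0 : (0 : Int) ≤ c) (h : ∀ v ∈ l, f v ≤ c) : pvBest f 0 l ≤ c := by
  rcases pvBest_cases f 0 l with hc | ⟨i, hi, hc⟩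
  · omega
  · rw [hc]; exact h i hi

theorem pvBest_mono (f g : Int → Int) (l : List Int)
    (h : ∀ v ∈ l, f v ≤ g v) : pvBest f 0 l ≤ pvBest g 0 l := by
  rcases pvBest_cases f 0 l with hc | ⟨i, hi, hc⟩
  · rw [hc]; exact pvBest_init_le g 0 l
  · rw [hc]; exact le_trans (h i hi) (pvBest_mem_le g l 0 hi)

theorem pvBest_congrF (f g : Int → Int) (l : List Int) (a : Int)
    (h : ∀ v ∈ l, f v = g v) : pvBest f a l = pvBest g a l := by
  induction l generalizing a with
  | nil => rfl
  | cons x xs ih =>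
      simp only [pvBest, List.foldl_cons] at *
      rw [h x (List.mem_cons_self ..)]
      exact ih _ (fun v hv => h v (List.mem_cons_of_mem _ hv))

theorem pvBest_congr (f : Int → Int) (l₁ l₂ : List Int) (h : ∀ x, x ∈ l₁ ↔ x ∈ l₂) :
    pvBest f 0 l₁ = pvBest f 0 l₂ := by
  have half : ∀ (u v : List Int), (∀ x, x ∈ u → x ∈ v) → pvBest f 0 u ≤ pvBest f 0 v := by
    intro u v huv
    rcases pvBest_cases f 0 u with hc | ⟨i, hi, hc⟩
    · rw [hc]; exact pvBest_init_le f 0 v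
    · rw [hc]; exact pvBest_mem_le f v 0 (huv i hi)
  exact le_antisymm (half _ _ fun x hx => (h x).mp hx) (half _ _ fun x hx => (h x).mpr hx)

theorem pvBest_concat (f : Int → Int) (a : Int) (q : List Int) (x : Int) :
    pvBest f a (q ++ [x]) = if f x > pvBest f a q then f x else pvBest f a q := by
  simp [pvBest, List.foldl_append]

theorem count_concat_self (q : List Int) (x : Int) :
    ((q ++ [x]).count x : Int) = (q.count x : Int) + 1 := by
  simp [List.count_append]

theorem count_concat_ne (q : List Int) (x w : Int) (h : w ≠ x) :
    ((q ++ [x]).count w : Int) = (q.count w : Int) := by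
  have hx : List.count w [x] = 0 := by
    simp [Ne.symm h]
  simp [List.count_append, hx]

theorem pvF_concat_ne (q : List Int) (x w : Int) (h1 : w ≠ x) (h2 : w - 1 ≠ x) :
    pvF (q ++ [x]) w = pvF q w := by
  unfold pvF
  rw [count_concat_ne _ _ _ h1, count_concat_ne _ _ _ h2]

theorem pvStep_none (best run prevrun x : Int) :
    pvStep (best, run, prevrun, none) x = (if 1 > best then 1 else best, 1, 0, some x) := by
  simp [pvStep]

theorem pvStep_self (best run prevrun v : Int) :
    pvStep (best, run, prevrun, some v) v =
      (if run + 1 + prevrun > best then run + 1 + prevrun else best, run + 1, prevrun, some v) := by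
  simp [pvStep]

theorem pvStep_succ (best run prevrun v x : Int) (h2 : x = v + 1) :
    pvStep (best, run, prevrun, some v) x =
      (if 1 + run > best then 1 + run else best, 1, run, some x) := by
  simp [pvStep, h2]

theorem pvStep_gap (best run prevrun v x : Int) (h1 : ¬ x = v) (h2 : ¬ x = v + 1) :
    pvStep (best, run, prevrun, some v) x =
      (if 1 + 0 > best then 1 + 0 else best, 1, 0, some x) := by
  simp [pvStep, h1, h2]

-- the maximum over a sorted-append step
theorem pvBest_sorted_concat (q : List Int) (x : Int) (hle : ∀ y ∈ q, y ≤ x) :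
    pvBest (pvF (q ++ [x])) 0 (q ++ [x]) =
      if pvF (q ++ [x]) x > pvBest (pvF q) 0 q then pvF (q ++ [x]) x
      else pvBest (pvF q) 0 q := by
  rw [pvBest_concat]
  have hmono : pvBest (pvF q) 0 q ≤ pvBest (pvF (q ++ [x])) 0 q := by
    refine pvBest_mono _ _ _ (fun v _ => ?_)
    have h1 : (q.count v : Int) ≤ ((q ++ [x]).count v : Int) := by
      simp [List.count_append]
    have h2 : (q.count (v - 1) : Int) ≤ ((q ++ [x]).count (v - 1) : Int) := by
      simp [List.count_append]
    simp only [pvF]; omega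
  have hub : pvBest (pvF (q ++ [x])) 0 q ≤
      if pvF (q ++ [x]) x > pvBest (pvF q) 0 q then pvF (q ++ [x]) x
      else pvBest (pvF q) 0 q := by
    have h0 : (0 : Int) ≤ pvBest (pvF q) 0 q := pvBest_init_le _ _ _
    refine pvBest_le _ _ _ (by split <;> omega) (fun v hv => ?_)
    by_cases hvx : v = x
    · subst hvx; split <;> omega
    · have hvlt : v < x := lt_of_le_of_ne (hle v hv) hvx
      rw [pvF_concat_ne q x v hvx (by omega)]
      have := pvBest_mem_le (pvF q) q 0 hv
      split <;> omega
  split <;> omega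

-- every element of a ≤-sorted list is ≤ its last element
theorem le_getLast_of_pairwise :
    ∀ (p : List Int) (v : Int), p.Pairwise (· ≤ ·) → p.getLast? = some v → ∀ y ∈ p, y ≤ v := by
  intro p
  induction p using List.reverseRecOn with
  | nil => intro v _ h; simp at h
  | append_singleton q x _ =>
      intro v hpw hl y hy
      rw [List.getLast?_concat] at hl
      have hxv : x = v := by injection hl
      rcases List.pairwise_append.mp hpw with ⟨_, _, hq⟩
      rcases List.mem_append.mp hy with hyq | hyx
      · have := hq y hyq x (List.mem_singleton_self x); omega
      · simp at hyx; omega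

-- the loop invariant of B's scan over a sorted list
theorem pvLoop_spec :
    ∀ (p : List Int), p.Pairwise (· ≤ ·) →
      p.foldl pvStep (0, 0, 0, none) =
        (match p.getLast? with
         | none => ((0 : Int), (0 : Int), (0 : Int), (none : Option Int))
         | some v => (pvBest (pvF p) 0 p, (p.count v : Int), (p.count (v - 1) : Int), some v)) := by
  intro p
  induction p using List.reverseRecOn with
  | nil => intro _; rfl
  | append_singleton q x ih =>
      intro hpw
      rcases List.pairwise_append.mp hpw with ⟨hq, _, hle0⟩
      have hle : ∀ y ∈ q, y ≤ x := fun y hy => hle0 y hy x (List.mem_singleton_self x)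
      rw [List.foldl_append, ih hq, List.getLast?_concat]
      have hbest := pvBest_sorted_concat q x hle
      have hfx : pvF (q ++ [x]) x = ((q ++ [x]).count x : Int) + ((q ++ [x]).count (x - 1) : Int) := rfl
      cases hql : q.getLast? with
      | none =>
          have hqnil : q = [] := List.getLast?_eq_none_iff.mp hql
          subst hqnil
          have hne1 : ¬ ((x : Int) = x - 1) := by omega
          simp [pvStep_none, pvBest, pvF, List.count_cons, hne1]
      | some v =>
          have hvq : v ∈ q := List.mem_of_getLast? hql
          have hvx : v ≤ x := hle v hvq
          have hall : ∀ y ∈ q, y ≤ v := le_getLast_of_pairwise q v hq hql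
          simp only [List.foldl_cons, List.foldl_nil]
          by_cases h1 : x = v
          · -- x continues the current run
            subst h1
            have hc1 : ((q ++ [x]).count x : Int) = (q.count x : Int) + 1 := count_concat_self q x
            have hc2 : ((q ++ [x]).count (x - 1) : Int) = (q.count (x - 1) : Int) :=
              count_concat_ne q x (x - 1) (by omega)
            rw [pvStep_self, hbest, hfx, hc1, hc2]
          · by_cases h2 : x = v + 1
            · -- x starts a new run adjacent to the previous one
              have hxnq : (q.count x : Int) = 0 := by
                have : x ∉ q := fun hx => by have := hall x hx; omega
                simp [List.count_eq_zero_of_not_mem this]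
              have hc1 : ((q ++ [x]).count x : Int) = (q.count x : Int) + 1 := count_concat_self q x
              have hc2 : ((q ++ [x]).count (x - 1) : Int) = (q.count (x - 1) : Int) :=
                count_concat_ne q x (x - 1) (by omega)
              have hxm1 : x - 1 = v := by omega
              rw [pvStep_succ _ _ _ _ _ h2, hbest, hfx, hc1, hc2, hxm1, hxnq]
              simp only [zero_add]
            · -- x starts a run with a gap before it
              have hxgt : v + 1 < x := by
                rcases lt_or_eq_of_le hvx with h | h
                · rcases lt_or_eq_of_le (Int.add_one_le_iff.mpr h) with h' | h'
                  · exact h'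
                  · exact absurd h'.symm h2
                · exact absurd h.symm h1
              have hxnq : (q.count x : Int) = 0 := by
                have : x ∉ q := fun hx => by have := hall x hx; omega
                simp [List.count_eq_zero_of_not_mem this]
              have hxm1nq : (q.count (x - 1) : Int) = 0 := by
                have : x - 1 ∉ q := fun hx => by have := hall (x - 1) hx; omega
                simp [List.count_eq_zero_of_not_mem this]
              have hc1 : ((q ++ [x]).count x : Int) = (q.count x : Int) + 1 := count_concat_self q x
              have hc2 : ((q ++ [x]).count (x - 1) : Int) = (q.count (x - 1) : Int) :=
                count_concat_ne q x (x - 1) (by omega)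
              rw [pvStep_gap _ _ _ _ _ h1 h2, hbest, hfx, hc1, hc2, hxnq, hxm1nq]
              simp only [zero_add, add_zero]

theorem pick_numbers_eq_pvBest (arr : List Int) :
    pick_numbers arr = pvBest (pvF arr) 0 arr := by
  simp [pick_numbers, pvBest, pvF, PySem.List.count]

theorem pick_numbers_alt_eq_pvBest (arr : List Int) :
    pick_numbers_alt arr = pvBest (pvF arr) 0 arr := by
  have hs : (PySem.List.sorted arr (fun x => x) false).Pairwise (· ≤ ·) :=
    PySem.List.sorted_pairwise arr (fun x => x)
  have hperm : (PySem.List.sorted arr (fun x => x) false).Perm arr :=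
    PySem.List.sorted_perm arr (fun x => x) false
  unfold pick_numbers_alt
  rw [pvLoop_spec _ hs]
  cases hl : (PySem.List.sorted arr (fun x => x) false).getLast? with
  | none =>
      have hnil : PySem.List.sorted arr (fun x => x) false = [] :=
        List.getLast?_eq_none_iff.mp hl
      have harr : arr = [] := (hnil ▸ hperm).symm.eq_nil
      subst harr
      simp [pvBest]
  | some v =>
      simp only
      have hcong : pvBest (pvF (PySem.List.sorted arr (fun x => x) false)) 0
          (PySem.List.sorted arr (fun x => x) false) = pvBest (pvF arr) 0 arr := by
        rw [pvBest_congrF _ (pvF arr) _ 0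
          (fun w _ => by simp [pvF, hperm.count_eq])]
        exact pvBest_congr _ _ _ (fun w => ⟨fun h => hperm.mem_iff.mp h, fun h => hperm.mem_iff.mpr h⟩)
      exact hcong

-- ===== VERDICT (by name: the statement is the Claim_ definition above) =====
theorem pick_numbers_spec : Claim_equal_pick_numbers := by
  intro arr _
  show pick_numbers arr = pick_numbers_alt arr
  rw [pick_numbers_eq_pvBest, pick_numbers_alt_eq_pvBest]
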